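-- pv_equiv track=rewrite | github.com/cedced19/tp-mpsi | entrainements/1/exam1.py | dio2
-- ===== SOURCE A (Python) =====
-- def dio2 (p):
--     L=[]
--     x=0
--     z=2*p*p
--     while x*x <= z:
--         y=x
--         while x*x+y*y <= z:
--             if (x*x+y*y) == z:
--                 L.append([x,y])
--             y+=1
--         x+=1
--     return(L)
-- ===== SOURCE B (Python) =====
-- def _isqrt(n):
--     # floor square root by binary search (no imports, as in the original module)
--     lo, hi = 0, n + 1
--     while hi - lo > 1:
--         mid = (lo + hi) // 2
--         if mid * mid <= n:
--             lo = mid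
--         else:
--             hi = mid
--     return lo
--
--
-- def dio2(p):
--     z = 2 * p * p
--     out = []
--     for x in range(_isqrt(z) + 1):
--         r = z - x * x
--         s = _isqrt(r)
--         if s * s == r and s >= x:
--             out.append([x, s])
--     return out
-- ===== Notes on version B (the rewrite author's own statement) =====
-- stated objective: faster
-- what changed: Replaced A's nested while loops (scanning every y for every x) by a single pass over x that tests whether 2p^2 - x^2 is a perfect square via a binary-search integer square root.
import Mathlib
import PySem

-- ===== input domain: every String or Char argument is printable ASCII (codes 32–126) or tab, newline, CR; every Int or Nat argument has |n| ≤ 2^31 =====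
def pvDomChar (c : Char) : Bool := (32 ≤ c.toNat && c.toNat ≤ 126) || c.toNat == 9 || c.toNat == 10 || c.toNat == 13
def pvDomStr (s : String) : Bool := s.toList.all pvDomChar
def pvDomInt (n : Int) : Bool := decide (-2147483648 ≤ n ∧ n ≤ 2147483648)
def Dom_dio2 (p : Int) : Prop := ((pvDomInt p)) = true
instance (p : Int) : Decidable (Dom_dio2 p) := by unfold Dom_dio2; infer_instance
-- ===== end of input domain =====

-- B replaces A's quadratic double scan by one pass over x with an integer-sqrt
-- perfect-square test for the remainder (objective: faster, asymptotic).

-- ===== PORT A =====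
-- inner 'while x*x+y*y <= z' loop of A (y only ever starts at x ≥ 0, carried as hy)
def dio2Inner (z x : Int) (y : Int) (hy : 0 ≤ y) (L : List (List Int)) : List (List Int) :=
  if _h : x * x + y * y ≤ z then
    dio2Inner z x (y + 1) (by omega) (if x * x + y * y = z then L ++ [[x, y]] else L)
  else L
termination_by (z + 1 - x * x - y * y).toNat
decreasing_by
  have h1 : (y + 1) * (y + 1) = y * y + 2 * y + 1 := by ring
  omega

-- outer 'while x*x <= z' loop of A
def dio2Outer (z x : Int) (hx : 0 ≤ x) (L : List (List Int)) : List (List Int) :=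
  if _h : x * x ≤ z then
    dio2Outer z (x + 1) (by omega) (dio2Inner z x x hx L)
  else L
termination_by (z + 1 - x * x).toNat
decreasing_by
  have h1 : (x + 1) * (x + 1) = x * x + 2 * x + 1 := by ring
  omega

def dio2 (p : Int) : List (List Int) := dio2Outer (2 * p * p) 0 (by omega) []

-- ===== PORT B =====
-- Source B's _isqrt binary-search loop
def isqrtGo (n lo hi : Int) : Int :=
  if _h : hi - lo > 1 then
    if (PySem.Int.floordiv (lo + hi) 2) * (PySem.Int.floordiv (lo + hi) 2) ≤ n then
      isqrtGo n (PySem.Int.floordiv (lo + hi) 2) hi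
    else
      isqrtGo n lo (PySem.Int.floordiv (lo + hi) 2)
  else lo
termination_by (hi - lo).toNat
decreasing_by
  all_goals
    have hm := PySem.Int.floordiv_eq_ediv_of_pos (a := lo + hi) (b := 2) (by omega)
    omega

def isqrtB (n : Int) : Int := isqrtGo n 0 (n + 1)

def dio2_alt (p : Int) : List (List Int) :=
  let z := 2 * p * p
  (PySem.List.pyRange 0 (isqrtB z + 1) 1).foldl
    (fun out x =>
      let r := z - x * x
      let s := isqrtB r
      if s * s = r ∧ x ≤ s then out ++ [[x, s]] else out) []

-- ===== PRECONDITION & SPEC =====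
def Spec_dio2 (p : Int) (out : List (List Int)) : Prop := out = dio2_alt p
instance (p : Int) (out : List (List Int)) : Decidable (Spec_dio2 p out) := by unfold Spec_dio2; infer_instance

-- ===== CLAIM (what is proved, stated in full; the proofs are below) =====
def Claim_equal_dio2 : Prop := ∀ (p : Int), Dom_dio2 p → Spec_dio2 p (dio2 p)

-- ===== LEMMAS AND PROOFS =====

-- the contribution of one x value: [x, s] iff z - x² is a perfect square s² with s ≥ x
def pvBody (z x : Int) : List (List Int) :=
  if isqrtB (z - x * x) * isqrtB (z - x * x) = z - x * x ∧ x ≤ isqrtB (z - x * x)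
  then [[x, isqrtB (z - x * x)]] else []

lemma isqrtGo_spec (n : Int) : ∀ (k : Nat) (lo hi : Int), (hi - lo).toNat ≤ k →
    0 ≤ lo → lo < hi → lo * lo ≤ n → n < hi * hi →
    0 ≤ isqrtGo n lo hi ∧ isqrtGo n lo hi * isqrtGo n lo hi ≤ n ∧
      n < (isqrtGo n lo hi + 1) * (isqrtGo n lo hi + 1) := by
  intro k
  induction k with
  | zero => intro lo hi hk h0 h1 _ _; omega
  | succ k ih =>
    intro lo hi hk h0 h1 h2 h3
    rw [isqrtGo]
    by_cases hgt : hi - lo > 1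
    · have hm := PySem.Int.floordiv_eq_ediv_of_pos (a := lo + hi) (b := 2) (by omega)
      set mid := PySem.Int.floordiv (lo + hi) 2 with hmid
      have hlo : lo < mid := by omega
      have hhi : mid < hi := by omega
      by_cases hle : mid * mid ≤ n
      · simp only [hgt, dif_pos, hle, if_pos]
        exact ih mid hi (by omega) (by omega) hhi hle h3
      · simp only [hgt, dif_pos, hle, if_neg, not_false_iff]
        exact ih lo mid (by omega) h0 hlo h2 (by omega)
    · simp only [hgt, dif_neg, not_false_iff]
      have : hi = lo + 1 := by omega
      subst this
      exact ⟨h0, h2, h3⟩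

lemma isqrtB_spec (n : Int) (hn : 0 ≤ n) :
    0 ≤ isqrtB n ∧ isqrtB n * isqrtB n ≤ n ∧ n < (isqrtB n + 1) * (isqrtB n + 1) := by
  have h : (n + 1) * (n + 1) = n * n + 2 * n + 1 := by ring
  have hsq := mul_self_nonneg n
  exact isqrtGo_spec n (n + 1 - 0).toNat 0 (n + 1) (le_refl _) (le_refl _) (by omega)
    (by omega) (by omega)

lemma isqrtB_unique (n y : Int) (hy : 0 ≤ y) (h : y * y = n) : isqrtB n = y := by
  obtain ⟨h0, h1, h2⟩ := isqrtB_spec n (h ▸ mul_self_nonneg y)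
  nlinarith

lemma inner_eq (z x : Int) : ∀ (k : Nat) (y : Int) (hy : 0 ≤ y),
    (z + 1 - x * x - y * y).toNat ≤ k → ∀ L,
    dio2Inner z x y hy L = L ++
      (if isqrtB (z - x * x) * isqrtB (z - x * x) = z - x * x ∧ y ≤ isqrtB (z - x * x)
       then [[x, isqrtB (z - x * x)]] else []) := by
  intro k
  induction k with
  | zero =>
    intro y hy hk L
    have hgt : ¬ (x * x + y * y ≤ z) := by
      intro h; omega
    rw [dio2Inner]
    simp only [hgt, dif_neg, not_false_iff]
    have : ¬ (isqrtB (z - x * x) * isqrtB (z - x * x) = z - x * x ∧ y ≤ isqrtB (z - x * x)) := by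
      rintro ⟨h1, h2⟩
      nlinarith
    simp [this]
  | succ k ih =>
    intro y hy hk L
    rw [dio2Inner]
    by_cases h : x * x + y * y ≤ z
    · simp only [h, dif_pos]
      have hr : 0 ≤ z - x * x := by nlinarith
      obtain ⟨hs0, hs1, hs2⟩ := isqrtB_spec (z - x * x) hr
      have hy1 : (y + 1) * (y + 1) = y * y + 2 * y + 1 := by ring
      rw [ih (y + 1) (by omega) (by omega)]
      by_cases heq : x * x + y * y = z
      · have hsy : isqrtB (z - x * x) = y := isqrtB_unique _ y hy (by omega)
        rw [hsy]
        simp [show ¬ (y + 1 ≤ y) by omega, show y * y = z - x * x by omega]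
      · have hlt : y * y < z - x * x := by omega
        simp only [heq, if_neg, not_false_iff]
        congr 1
        by_cases hsq : isqrtB (z - x * x) * isqrtB (z - x * x) = z - x * x
        · have : y < isqrtB (z - x * x) := by nlinarith
          have h1 : (isqrtB (z - x * x) * isqrtB (z - x * x) = z - x * x ∧ y + 1 ≤ isqrtB (z - x * x)) := ⟨hsq, by omega⟩
          have h2 : (isqrtB (z - x * x) * isqrtB (z - x * x) = z - x * x ∧ y ≤ isqrtB (z - x * x)) := ⟨hsq, by omega⟩
          simp [h1, h2]
        · simp [hsq]
    · simp only [h, dif_neg, not_false_iff]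
      have : ¬ (isqrtB (z - x * x) * isqrtB (z - x * x) = z - x * x ∧ y ≤ isqrtB (z - x * x)) := by
        rintro ⟨h1, h2⟩
        nlinarith
      simp [this]

lemma outer_eq (z : Int) (hz : 0 ≤ z) : ∀ (k : Nat) (x : Int) (hx : 0 ≤ x),
    (z + 1 - x * x).toNat ≤ k → ∀ L,
    dio2Outer z x hx L = L ++ (PySem.List.pyRange x (isqrtB z + 1) 1).flatMap (pvBody z) := by
  obtain ⟨hz0, hz1, hz2⟩ := isqrtB_spec z hz
  intro k
  induction k with
  | zero =>
    intro x hx hk L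
    have h : ¬ (x * x ≤ z) := by intro h; omega
    rw [dio2Outer]
    simp only [h, dif_neg, not_false_iff]
    have hxs : isqrtB z + 1 ≤ x := by nlinarith
    rw [PySem.List.pyRange_one_eq_nil hxs]
    simp
  | succ k ih =>
    intro x hx hk L
    rw [dio2Outer]
    by_cases h : x * x ≤ z
    · simp only [h, dif_pos]
      have hx1 : (x + 1) * (x + 1) = x * x + 2 * x + 1 := by ring
      rw [inner_eq z x (z + 1 - x * x - x * x).toNat x hx (le_refl _)]
      rw [ih (x + 1) (by omega) (by omega)]
      have hxs : x < isqrtB z + 1 := by nlinarith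
      rw [PySem.List.pyRange_one_cons hxs, List.flatMap_cons]
      rw [pvBody, List.append_assoc]
    · simp only [h, dif_neg, not_false_iff]
      have hxs : isqrtB z + 1 ≤ x := by nlinarith
      rw [PySem.List.pyRange_one_eq_nil hxs]
      simp

lemma foldl_body (z : Int) : ∀ (l : List Int) (acc : List (List Int)),
    l.foldl (fun out x =>
      let r := z - x * x
      let s := isqrtB r
      if s * s = r ∧ x ≤ s then out ++ [[x, s]] else out) acc
    = acc ++ l.flatMap (pvBody z) := by
  intro l
  induction l with
  | nil => intro acc; simp
  | cons a t ih =>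
    intro acc
    simp only [List.foldl_cons, List.flatMap_cons, ih, pvBody]
    split_ifs <;> simp

lemma alt_eq (p : Int) :
    dio2_alt p = (PySem.List.pyRange 0 (isqrtB (2 * p * p) + 1) 1).flatMap (pvBody (2 * p * p)) := by
  unfold dio2_alt
  exact foldl_body (2 * p * p) _ []

-- ===== VERDICT (by name: the statement is the Claim_ definition above) =====
theorem dio2_spec : Claim_equal_dio2 := by
  intro p _
  unfold Spec_dio2 dio2
  have hz : 0 ≤ 2 * p * p := by nlinarith [mul_self_nonneg p]
  rw [outer_eq (2 * p * p) hz (2 * p * p + 1 - 0).toNat 0 (le_refl _) (by omega)]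
  rw [alt_eq]
  simp
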